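-- pv_equiv track=rewrite | github.com/monzag/python-lightweight-erp-project-pylamas | ui.py | create_outer_row
-- ===== SOURCE A (Python) =====
-- def create_outer_row(table, columns_number, title_list, MIN_COLUMN_WIDTH, CELL_PADDING):
--     '''
--     Generates a string to be later printed as an outer row in a table.
--
--     Args:
--         table: list of lists of all the strings
--         columns_number: int
--         title_list: list of titles of columns that will be printed in a complete table
--         MIN_COLUMN_WIDTH: int
--         CELL_PADDING: int
--
--     Returns:
--         outer_row: string ready to be printed
--     '''
--     outer_row = ''
--
--     for i in range(columns_number):
--         dashes_to_add = find_max_string_length(table, i, title_list)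
--         if dashes_to_add >= MIN_COLUMN_WIDTH:
--             outer_row = outer_row + ('-' * (dashes_to_add + CELL_PADDING))
--         else:
--             outer_row = outer_row + ('-' * MIN_COLUMN_WIDTH)
--
--     additional_dashes = columns_number - 1
--     outer_row = outer_row + ('-' * additional_dashes)
--
--     return outer_row
--
-- def find_max_string_length(table, item_index, title_list):
--     '''
--     Finds longest string from all items with a specific index that will be printed in one column
--
--     Args:
--         table: list of lists of all the strings
--         item_index: int (specific index in lists in table)
--         title_list: list of titles of columns that will be printed in a complete table
--
--     Returns:
--         int (longest length value for a given index)
--     '''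
--     longest_string = ''
--
--     for a_list in table:
--         if len(str(a_list[item_index])) > len(longest_string):
--             longest_string = str(a_list[item_index])
--
--     if len(str(title_list[item_index])) > len(longest_string):
--         longest_string = str(title_list[item_index])
--
--     longest_value = len(longest_string)
--
--     return longest_value
-- ===== SOURCE B (Python) =====
-- def create_outer_row(table, columns_number, title_list, MIN_COLUMN_WIDTH, CELL_PADDING):
--     widths = [len(str(title_list[i])) for i in range(columns_number)]
--     for row in table:
--         widths = [max(w, len(str(c))) for w, c in zip(widths, row)]
--     parts = [('-' * (w + CELL_PADDING)) if w >= MIN_COLUMN_WIDTH else ('-' * MIN_COLUMN_WIDTH)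
--              for w in widths]
--     parts.append('-' * (columns_number - 1))
--     return ''.join(parts)
-- ===== Notes on version B (the rewrite author's own statement) =====
-- stated objective: alternative
-- what changed: Replaces A's per-column helper (which rescans the whole table once per column, tracking the longest string itself) by a single row-major pass maintaining a list of numeric column widths seeded from the titles, then builds the row with a join instead of repeated string concatenation.
import Mathlib
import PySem

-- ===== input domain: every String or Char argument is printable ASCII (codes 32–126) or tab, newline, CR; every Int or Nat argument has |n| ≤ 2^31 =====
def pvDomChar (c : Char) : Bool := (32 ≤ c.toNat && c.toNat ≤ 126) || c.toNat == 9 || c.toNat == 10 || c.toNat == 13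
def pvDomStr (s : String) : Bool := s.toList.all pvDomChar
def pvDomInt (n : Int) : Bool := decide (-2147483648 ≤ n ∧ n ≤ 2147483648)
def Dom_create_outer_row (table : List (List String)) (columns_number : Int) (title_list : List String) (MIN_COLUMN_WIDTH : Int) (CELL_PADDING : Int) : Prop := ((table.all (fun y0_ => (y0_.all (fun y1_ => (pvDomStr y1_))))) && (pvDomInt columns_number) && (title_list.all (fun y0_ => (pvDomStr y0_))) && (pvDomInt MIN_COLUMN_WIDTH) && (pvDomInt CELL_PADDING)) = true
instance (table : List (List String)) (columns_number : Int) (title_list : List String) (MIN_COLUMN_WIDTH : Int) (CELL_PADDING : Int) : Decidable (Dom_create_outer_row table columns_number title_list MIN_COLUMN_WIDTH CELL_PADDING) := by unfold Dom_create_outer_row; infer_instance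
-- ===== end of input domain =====

-- B replaces A's per-column rescans (helper called once per column, scanning the whole table each time)
-- by one row-major pass maintaining a widths list, then joins the pieces; objective: alternative decomposition.


-- ===== PORT A =====
-- '-' * n  (empty for n ≤ 0, as in Python)
def pvDashes (n : Int) : List Char := List.replicate n.toNat '-'

def find_max_string_length (table : List (List String)) (item_index : Int) (title_list : List String) : Int :=
  let longest := table.foldl
    (fun longest a_list =>
      let s := (PySem.List.pyGet? a_list item_index).getD ""
      if PySem.Str.len s > PySem.Str.len longest then s else longest) ""
  let t := (PySem.List.pyGet? title_list item_index).getD ""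
  let longest := if PySem.Str.len t > PySem.Str.len longest then t else longest
  PySem.Str.len longest

def create_outer_row (table : List (List String)) (columns_number : Int) (title_list : List String) (MIN_COLUMN_WIDTH : Int) (CELL_PADDING : Int) : String :=
  let outer : List Char := (PySem.List.pyRange 0 columns_number 1).foldl
    (fun outer_row i =>
      let dashes_to_add := find_max_string_length table i title_list
      if dashes_to_add ≥ MIN_COLUMN_WIDTH then
        outer_row ++ pvDashes (dashes_to_add + CELL_PADDING)
      else
        outer_row ++ pvDashes MIN_COLUMN_WIDTH) []
  String.mk (outer ++ pvDashes (columns_number - 1))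

-- ===== PORT B =====
def create_outer_row_alt (table : List (List String)) (columns_number : Int) (title_list : List String) (MIN_COLUMN_WIDTH : Int) (CELL_PADDING : Int) : String :=
  let widths0 := (PySem.List.pyRange 0 columns_number 1).map
    (fun i => PySem.Str.len ((PySem.List.pyGet? title_list i).getD ""))
  let widths := table.foldl
    (fun ws row => (ws.zip row).map (fun p => max p.1 (PySem.Str.len p.2))) widths0
  let parts := widths.map
    (fun w => if w ≥ MIN_COLUMN_WIDTH then pvDashes (w + CELL_PADDING) else pvDashes MIN_COLUMN_WIDTH)
  String.mk ((parts ++ [pvDashes (columns_number - 1)]).flatten)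

-- ===== PRECONDITION & SPEC =====
-- Pre_ excludes exactly the inputs where Python A raises IndexError: a positive column count
-- with a too-short title list or a too-short table row.
def Pre_create_outer_row (table : List (List String)) (columns_number : Int) (title_list : List String) (MIN_COLUMN_WIDTH : Int) (CELL_PADDING : Int) : Prop :=
  0 < columns_number →
    (columns_number ≤ (title_list.length : Int) ∧ ∀ row ∈ table, columns_number ≤ (row.length : Int))
instance (table : List (List String)) (columns_number : Int) (title_list : List String) (MIN_COLUMN_WIDTH : Int) (CELL_PADDING : Int) : Decidable (Pre_create_outer_row table columns_number title_list MIN_COLUMN_WIDTH CELL_PADDING) := by unfold Pre_create_outer_row; infer_instance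

def pvWitness_create_outer_row : List (List String) × Int × List String × Int × Int :=
  ([["a", "xx"], ["bbb", "c"]], 2, ["id", "name"], 3, 1)

def Spec_create_outer_row (table : List (List String)) (columns_number : Int) (title_list : List String) (MIN_COLUMN_WIDTH : Int) (CELL_PADDING : Int) (out : String) : Prop := out = create_outer_row_alt table columns_number title_list MIN_COLUMN_WIDTH CELL_PADDING
instance (table : List (List String)) (columns_number : Int) (title_list : List String) (MIN_COLUMN_WIDTH : Int) (CELL_PADDING : Int) (out : String) : Decidable (Spec_create_outer_row table columns_number title_list MIN_COLUMN_WIDTH CELL_PADDING out) := by unfold Spec_create_outer_row; infer_instance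

-- ===== CLAIM (what is proved, stated in full; the proofs are below) =====
def Claim_equal_create_outer_row : Prop := ∀ (table : List (List String)) (columns_number : Int) (title_list : List String) (MIN_COLUMN_WIDTH : Int) (CELL_PADDING : Int), Dom_create_outer_row table columns_number title_list MIN_COLUMN_WIDTH CELL_PADDING → Pre_create_outer_row table columns_number title_list MIN_COLUMN_WIDTH CELL_PADDING → Spec_create_outer_row table columns_number title_list MIN_COLUMN_WIDTH CELL_PADDING (create_outer_row table columns_number title_list MIN_COLUMN_WIDTH CELL_PADDING)

-- ===== LEMMAS AND PROOFS =====

-- length of the column entry A reads at index i (0 when out of range; Pre_ keeps it in range)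
def pvLenAt (row : List String) (i : Int) : Int :=
  PySem.Str.len ((PySem.List.pyGet? row i).getD "")

-- the length of A's "longest string so far" fold is a fold of max over the lengths
lemma len_longest_fold (i : Int) :
    ∀ (l : List (List String)) (acc : String),
      PySem.Str.len (l.foldl
        (fun longest a_list =>
          let s := (PySem.List.pyGet? a_list i).getD ""
          if PySem.Str.len s > PySem.Str.len longest then s else longest) acc)
      = l.foldl (fun w row => max w (pvLenAt row i)) (PySem.Str.len acc) := by
  intro l
  induction l with
  | nil => intro acc; rfl
  | cons row rest ih =>
    intro acc
    simp only [List.foldl_cons]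
    rcases lt_or_ge (PySem.Str.len acc) (pvLenAt row i) with h | h
    · rw [show (if PySem.Str.len ((PySem.List.pyGet? row i).getD "") > PySem.Str.len acc
            then (PySem.List.pyGet? row i).getD "" else acc) = (PySem.List.pyGet? row i).getD ""
          from if_pos h, ih]
      rw [max_eq_right (le_of_lt h)]
      rfl
    · rw [show (if PySem.Str.len ((PySem.List.pyGet? row i).getD "") > PySem.Str.len acc
            then (PySem.List.pyGet? row i).getD "" else acc) = acc
          from if_neg (not_lt.mpr h), ih]
      rw [max_eq_left h]

-- pulling the left argument out of a fold of max
lemma foldl_max_init (i : Int) :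
    ∀ (l : List (List String)) (a b : Int),
      l.foldl (fun w row => max w (pvLenAt row i)) (max a b)
      = max a (l.foldl (fun w row => max w (pvLenAt row i)) b) := by
  intro l
  induction l with
  | nil => intro a b; rfl
  | cons row rest ih =>
    intro a b
    simp only [List.foldl_cons, max_assoc, ih]

lemma len_nonneg (s : String) : 0 ≤ PySem.Str.len s := by
  rw [PySem.Str.len_eq]; exact Int.natCast_nonneg _

-- A's per-column helper equals B's row-major accumulation for that column
lemma fmsl_eq (table : List (List String)) (i : Int) (title_list : List String) :
    find_max_string_length table i title_list
    = table.foldl (fun w row => max w (pvLenAt row i)) (pvLenAt title_list i) := by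
  unfold find_max_string_length
  rw [apply_ite PySem.Str.len, len_longest_fold i table ""]
  have h0 : PySem.Str.len ("" : String) = 0 := by decide
  rw [h0]
  set F := table.foldl (fun w row => max w (pvLenAt row i)) 0 with hF
  have : pvLenAt title_list i = max (pvLenAt title_list i) 0 :=
    (max_eq_left (len_nonneg _)).symm
  rw [this, foldl_max_init i table _ 0, ← hF]
  unfold pvLenAt
  rcases lt_or_ge F (PySem.Str.len ((PySem.List.pyGet? title_list i).getD "")) with h | h
  · rw [if_pos h, max_eq_left (le_of_lt h)]
  · rw [if_neg (not_lt.mpr h), max_eq_right h]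

-- one row-major step over a widths list indexed by pyRange
lemma zip_step (cn : Int) (f : Int → Int) (row : List String)
    (hrow : cn.toNat ≤ row.length) :
    (((PySem.List.pyRange 0 cn 1).map f).zip row).map
        (fun p => max p.1 (PySem.Str.len p.2))
    = (PySem.List.pyRange 0 cn 1).map (fun i => max (f i) (pvLenAt row i)) := by
  rw [PySem.List.pyRange_one]
  apply List.ext_getElem
  · simp [hrow]
  · intro k h1 h2
    simp only [List.getElem_map, List.getElem_zip, List.getElem_map, List.getElem_range]
    have hk : k < cn.toNat := by simpa using h2
    have hkr : k < row.length := lt_of_lt_of_le hk hrow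
    have : pvLenAt row (0 + (k : Int)) = PySem.Str.len row[k] := by
      unfold pvLenAt
      rw [zero_add, PySem.List.pyGet?_natCast, List.getElem?_eq_getElem hkr]
      rfl
    rw [this]

-- B's widths after folding the whole table, columnwise
lemma widths_fold (cn : Int) :
    ∀ (table : List (List String)) (f : Int → Int),
      (∀ row ∈ table, cn.toNat ≤ row.length) →
      table.foldl
        (fun ws row => (ws.zip row).map (fun p => max p.1 (PySem.Str.len p.2)))
        ((PySem.List.pyRange 0 cn 1).map f)
      = (PySem.List.pyRange 0 cn 1).map
          (fun i => table.foldl (fun w row => max w (pvLenAt row i)) (f i)) := by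
  intro table
  induction table with
  | nil => intro f _; rfl
  | cons row rest ih =>
    intro f hrows
    simp only [List.foldl_cons]
    rw [zip_step cn f row (hrows row (List.mem_cons_self ..)),
        ih (fun i => max (f i) (pvLenAt row i)) (fun r hr => hrows r (List.mem_cons_of_mem _ hr))]

theorem create_outer_row_spec : Claim_equal_create_outer_row := by
  intro table cn title_list MINW PAD _hdom hpre
  unfold Spec_create_outer_row create_outer_row create_outer_row_alt
  dsimp only
  congr 1
  have hrows : ∀ row ∈ table, cn.toNat ≤ row.length := by
    intro row hr
    rcases lt_or_ge 0 cn with hc | hc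
    · have := (hpre hc).2 row hr; omega
    · omega
  -- B's widths are the columnwise maxima
  rw [widths_fold cn table _ hrows]
  -- A's fold of appends: hoist the append out of the if, then flatten to a flatMap
  have hbody : (fun (outer_row : List Char) (i : Int) =>
      if find_max_string_length table i title_list ≥ MINW then
        outer_row ++ pvDashes (find_max_string_length table i title_list + PAD)
      else outer_row ++ pvDashes MINW)
    = fun outer_row i => outer_row ++
        (if find_max_string_length table i title_list ≥ MINW then
          pvDashes (find_max_string_length table i title_list + PAD)
        else pvDashes MINW) := by
    funext o i; split_ifs <;> rfl
  rw [hbody, PySem.List.foldl_append_eq_flatMap, List.nil_append]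
  -- B's join: flatten of map ++ [tail]
  rw [List.map_map, List.flatten_append, List.flatten_cons, List.flatten_nil,
      List.append_nil, ← List.flatMap_def]
  have hfun : (fun i => if find_max_string_length table i title_list ≥ MINW then
        pvDashes (find_max_string_length table i title_list + PAD) else pvDashes MINW)
      = ((fun w => if w ≥ MINW then pvDashes (w + PAD) else pvDashes MINW) ∘ fun i =>
          List.foldl (fun w row => max w (pvLenAt row i))
            (PySem.Str.len ((PySem.List.pyGet? title_list i).getD "")) table) := by
    funext i
    rw [fmsl_eq table i title_list]
    rfl
  rw [hfun]
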